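-- pv_equiv track=rewrite | github.com/ishmam-hossain/problem-solving | codeforces/266B_queue_at_the_school.py | restructure_queue
-- ===== SOURCE A (Python) =====
-- def restructure_queue(s, n):
--     q = list(s)
--     for _ in range(n):
--         for i in range(len(s)-1):
--             if s[i] < s[i+1]:
--                 q[i+1], q[i] = q[i], q[i+1]
--         s = "".join(q)
--
--     return "".join(q)
-- ===== SOURCE B (Python) =====
-- def _round(q):
--     # one "second": rotate every maximal strictly-increasing run left by one
--     out = []
--     i = 0
--     L = len(q)
--     changed = False
--     while i < L:
--         j = i
--         while j + 1 < L and q[j] < q[j + 1]: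
--             j += 1
--         if j > i:
--             out.extend(q[i + 1:j + 1])
--             out.append(q[i])
--             changed = True
--         else:
--             out.append(q[i])
--         i = j + 1
--     return out, changed
--
-- def restructure_queue(s, n):
--     q = list(s)
--     r = 0
--     while r < n:
--         q2, changed = _round(q)
--         if not changed:
--             break
--         q = q2
--         r += 1
--     return "".join(q)
-- ===== Notes on version B (the rewrite author's own statement) =====
-- stated objective: alternative
-- what changed: Each second is computed by rotating every maximal strictly-increasing run one step left (built as a fresh output list, no indexed swaps), and the outer loop stops early as soon as a round changes nothing instead of always running n rounds.
import Mathlib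
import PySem

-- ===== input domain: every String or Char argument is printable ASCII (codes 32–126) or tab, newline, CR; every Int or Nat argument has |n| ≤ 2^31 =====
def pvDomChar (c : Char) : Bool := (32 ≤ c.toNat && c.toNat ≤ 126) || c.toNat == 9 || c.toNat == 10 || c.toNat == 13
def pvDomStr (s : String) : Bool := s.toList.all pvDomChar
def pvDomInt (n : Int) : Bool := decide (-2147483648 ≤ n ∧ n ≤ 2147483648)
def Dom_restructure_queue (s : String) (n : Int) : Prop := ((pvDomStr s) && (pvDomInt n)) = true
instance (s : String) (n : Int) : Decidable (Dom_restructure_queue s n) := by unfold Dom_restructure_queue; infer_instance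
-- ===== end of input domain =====

-- B replaces A's per-second indexed swap sweep by a run-rotation pass (each
-- maximal increasing run rotated one step left) with an early stop once a
-- round changes nothing (objective: alternative algorithm, same cost).


-- ===== PORT A =====
-- A's inner loop 'for i in range(len(s)-1): if s[i] < s[i+1]: swap q[i+1],q[i]'
-- rendered as structural recursion over the aligned suffixes of s (read-only
-- comparisons) and q (the swapped list): at step i it compares s[i],s[i+1] and
-- possibly swaps q[i],q[i+1]; position i is never touched again, so it is
-- emitted.  Exactly the same comparisons and swaps in the same order.
def aSweep : List Char → List Char → List Char
  | x :: y :: s, u :: v :: q =>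
      if x < y then v :: aSweep (y :: s) (u :: q)
      else u :: aSweep (y :: s) (v :: q)
  | _, q => q

-- 'for _ in range(n)': after each sweep s := "".join(q) (q equals s at the
-- start of every round, so the round is aSweep s s).
def aRounds : List Char → Nat → List Char
  | s, 0 => s
  | s, k + 1 => aRounds (aSweep s s) k

def restructure_queue (s : String) (n : Int) : String :=
  String.ofList (aRounds s.toList n.toNat)

-- ===== PORT B =====
-- B's round: scan the maximal strictly increasing run starting at the current
-- position, rotate it left by one, and record whether anything moved.
-- bGo a m t: a = last char of the run so far, m = the run's first char
-- (carried to the run's end), t = the rest of the string.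
def bGo (a m : Char) : List Char → List Char × Bool
  | [] => ([m], false)
  | b :: t =>
      if a < b then (b :: (bGo b m t).1, true)
      else (m :: (bGo b b t).1, (bGo b b t).2)

def bRound : List Char → List Char × Bool
  | [] => ([], false)
  | a :: t => bGo a a t

-- 'while r < n: … if not changed: break': fuel n.toNat, early stop.
def bRounds : List Char → Nat → List Char
  | s, 0 => s
  | s, k + 1 =>
      match bRound s with
      | (q, c) => if c then bRounds q k else s

def restructure_queue_alt (s : String) (n : Int) : String :=
  String.ofList (bRounds s.toList n.toNat)

-- ===== PRECONDITION & SPEC =====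
def Spec_restructure_queue (s : String) (n : Int) (out : String) : Prop := out = restructure_queue_alt s n
instance (s : String) (n : Int) (out : String) : Decidable (Spec_restructure_queue s n out) := by unfold Spec_restructure_queue; infer_instance

-- ===== CLAIM (what is proved, stated in full; the proofs are below) =====
def Claim_equal_restructure_queue : Prop := ∀ (s : String) (n : Int), Dom_restructure_queue s n → Spec_restructure_queue s n (restructure_queue s n)

-- ===== LEMMAS AND PROOFS =====

-- One A-sweep along a run equals B's run scan.
theorem aSweep_eq_bGo (t : List Char) : ∀ a m, aSweep (a :: t) (m :: t) = (bGo a m t).1 := by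
  induction t with
  | nil => intro a m; simp [aSweep, bGo]
  | cons b t ih =>
      intro a m
      by_cases h : a < b
      · simp [aSweep, bGo, h, ih b m]
      · simp [aSweep, bGo, h, ih b b]

theorem aRound_eq_bRound (s : List Char) : aSweep s s = (bRound s).1 := by
  cases s with
  | nil => simp [aSweep, bRound]
  | cons a t => simpa [bRound] using aSweep_eq_bGo t a a

-- If the round reports no change, it really changed nothing.
theorem bGo_unchanged (t : List Char) : ∀ a m, (bGo a m t).2 = false → (bGo a m t).1 = m :: t := by
  induction t with
  | nil => intro a m _; simp [bGo]
  | cons b t ih =>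
      intro a m h
      by_cases hab : a < b
      · simp [bGo, hab] at h
      · simp [bGo, hab] at h ⊢
        exact ih b b h

theorem bRound_unchanged (s : List Char) (h : (bRound s).2 = false) : (bRound s).1 = s := by
  cases s with
  | nil => simp [bRound]
  | cons a t => simpa [bRound] using bGo_unchanged t a a (by simpa [bRound] using h)

-- At a fixed point, further A-rounds do nothing.
theorem aRounds_fixed (k : Nat) : ∀ s : List Char, (bRound s).2 = false → aRounds s k = s := by
  induction k with
  | zero => intro s _; rfl
  | succ k ih =>
      intro s h
      have hs : aSweep s s = s := by rw [aRound_eq_bRound, bRound_unchanged s h]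
      simp [aRounds, hs, ih s h]

theorem rounds_eq (k : Nat) : ∀ s : List Char, aRounds s k = bRounds s k := by
  induction k with
  | zero => intro s; rfl
  | succ k ih =>
      intro s
      by_cases hc : (bRound s).2 = true
      · have : aSweep s s = (bRound s).1 := aRound_eq_bRound s
        simp [aRounds, bRounds, this, hc, ih]
      · have hf : (bRound s).2 = false := by simpa using hc
        have hs : aSweep s s = s := by rw [aRound_eq_bRound, bRound_unchanged s hf]
        simp [aRounds, bRounds, hs, hf, aRounds_fixed k s hf]

-- ===== VERDICT (by name: the statement is the Claim_ definition above) =====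
theorem restructure_queue_spec : Claim_equal_restructure_queue := by
  intro s n _
  unfold Spec_restructure_queue restructure_queue restructure_queue_alt
  rw [rounds_eq]
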